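-- pv_equiv track=rewrite | github.com/ElijahHW/BloomFilter | bloomFilter.py | hashSix
-- ===== SOURCE A (Python) =====
-- from math import prod
--
-- Prime = pow(2,24)-3 # prime
--
-- def hashSix(listValues) -> int: ## h6() - GROUPED SUMS OF FIVE, but addition and multiplication swapped
--     valuesList = listValues.copy()
--     subRes = []
--     result = 0
--     i = 0
--     N = 5
--     length = len(valuesList)
--     while(length % N) != 0:
--         valuesList.insert(len(valuesList), 32)
--         length += 1
--     if(length % N) == 0:
--         subList = [valuesList[n:n+N] for n in range(0, len(valuesList), N)]
--         for x in subList: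
--             subRes.append(prod(subList[i]))
--             i+=1
--         for x in subRes:
--             result = result + x
--             result = result % Prime
--         return result
-- ===== SOURCE B (Python) =====
-- Prime = pow(2, 24) - 3  # prime
--
-- def hashSix(listValues) -> int:
--     result = 0
--     prodAcc = 1
--     cnt = 0
--     for v in listValues:
--         prodAcc *= v
--         cnt += 1
--         if cnt == 5:
--             result = (result + prodAcc) % Prime
--             prodAcc = 1
--             cnt = 0
--     if cnt != 0:
--         result = (result + prodAcc * 32 ** (5 - cnt)) % Prime
--     return result
-- ===== Notes on version B (the rewrite author's own statement) =====
-- stated objective: simpler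
-- what changed: Replaces A's copy-and-pad while loop, slice-based chunk list and two further passes (products, then mod-sum) by one fused left-to-right scan keeping a running product and counter, folding each complete group into the mod-sum in place and completing a trailing partial group with a 32^missing multiplier instead of list padding.
import Mathlib
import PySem

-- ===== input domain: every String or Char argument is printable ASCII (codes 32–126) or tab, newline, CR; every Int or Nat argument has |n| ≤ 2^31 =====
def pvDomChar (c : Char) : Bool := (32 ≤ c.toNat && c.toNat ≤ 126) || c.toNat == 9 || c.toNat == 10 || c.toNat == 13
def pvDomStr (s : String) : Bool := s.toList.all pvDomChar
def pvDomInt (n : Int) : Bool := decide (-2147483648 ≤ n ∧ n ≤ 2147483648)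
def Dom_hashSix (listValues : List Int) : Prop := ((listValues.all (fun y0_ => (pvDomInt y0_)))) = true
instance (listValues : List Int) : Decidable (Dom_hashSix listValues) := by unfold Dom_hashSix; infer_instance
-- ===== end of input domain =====

-- B replaces A's pad-copy + slice-built chunk list + two further passes by one fused scan with a
-- running product and counter (objective: simpler; same O(n) cost).

-- ===== PORT A =====
def pvPrime : Int := 2 ^ 24 - 3

-- math.prod(xs)
def pvProd (xs : List Int) : Int := xs.foldl (· * ·) 1

-- A's `while (length % N) != 0: valuesList.insert(len(valuesList), 32); length += 1`
def pvPadLoop (vs : List Int) : List Int :=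
  if PySem.Int.mod (vs.length : Int) 5 ≠ 0 then pvPadLoop (vs ++ [32]) else vs
termination_by (5 - vs.length % 5) % 5
decreasing_by
  rename_i h
  rw [PySem.Int.mod_eq_emod_of_pos (by norm_num)] at h
  simp only [List.length_append, List.length_cons, List.length_nil]
  omega


def hashSix (listValues : List Int) : Int :=
  let valuesList := pvPadLoop listValues   -- copy, then the padding while-loop
  if PySem.Int.mod (valuesList.length : Int) 5 == 0 then
    let subList := (PySem.List.pyRange 0 (valuesList.length : Int) 5).map
        (fun n => PySem.List.slice valuesList (some n) (some (n + 5)))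
    let st := subList.foldl
        (fun (s : List Int × Int) _x =>
          match PySem.List.pyGet? subList s.2 with
          | some l => (s.1 ++ [pvProd l], s.2 + 1)
          | none => (s.1, s.2 + 1))      -- pyGet? cannot fail here; the no-op branch only keeps the port total
        ([], 0)
    st.1.foldl (fun result x => PySem.Int.mod (result + x) pvPrime) 0
  else 0   -- unreachable: the while-loop guarantees length % 5 == 0 (Python would fall off and return None here)

-- ===== PORT B =====
-- B's loop body: running (result, product, counter)
def pvBStep (st : Int × Int × Nat) (v : Int) : Int × Int × Nat :=
  let p := st.2.1 * v
  let c := st.2.2 + 1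
  if c == 5 then (PySem.Int.mod (st.1 + p) pvPrime, 1, 0) else (st.1, p, c)

def hashSix_alt (listValues : List Int) : Int :=
  let s := listValues.foldl pvBStep (0, 1, 0)
  if s.2.2 ≠ 0 then PySem.Int.mod (s.1 + s.2.1 * 32 ^ (5 - s.2.2)) pvPrime else s.1

-- ===== PRECONDITION & SPEC =====
def Spec_hashSix (listValues : List Int) (out : Int) : Prop := out = hashSix_alt listValues
instance (listValues : List Int) (out : Int) : Decidable (Spec_hashSix listValues out) := by unfold Spec_hashSix; infer_instance

-- ===== CLAIM (what is proved, stated in full; the proofs are below) =====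
def Claim_equal_hashSix : Prop := ∀ (listValues : List Int), Dom_hashSix listValues → Spec_hashSix listValues (hashSix listValues)

-- ===== LEMMAS AND PROOFS =====

theorem pvPadLoop_eq (L : List Int) :
    pvPadLoop L = L ++ List.replicate ((5 - L.length % 5) % 5) 32 := by
  fun_induction pvPadLoop L with
  | case1 vs h ih =>
    rw [ih]
    rw [PySem.Int.mod_eq_emod_of_pos (by norm_num)] at h
    have h2 : vs.length % 5 ≠ 0 := by omega
    have h3 : (5 - (vs ++ [32]).length % 5) % 5 + 1 = (5 - vs.length % 5) % 5 := by
      simp only [List.length_append, List.length_cons, List.length_nil]; omega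
    rw [← h3, List.append_assoc]
    congr 1
  | case2 vs h =>
    rw [PySem.Int.mod_eq_emod_of_pos (by norm_num)] at h
    have : vs.length % 5 = 0 := by omega
    simp [this]


theorem idxFold (full pre post : List (List Int)) (acc : List Int) (h : full = pre ++ post) :
    post.foldl
      (fun (s : List Int × Int) _x =>
        match PySem.List.pyGet? full s.2 with
        | some l => (s.1 ++ [pvProd l], s.2 + 1)
        | none => (s.1, s.2 + 1))
      (acc, (pre.length : Int))
    = (acc ++ post.map pvProd, ((pre.length + post.length : Nat) : Int)) := by
  induction post generalizing pre acc with
  | nil => simp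
  | cons x t ih =>
    simp only [List.foldl]
    have hget : PySem.List.pyGet? full (pre.length : Int) = some x := by
      rw [PySem.List.pyGet?_natCast, h, List.getElem?_append_right le_rfl]
      simp
    rw [hget]
    have := ih (pre ++ [x]) (acc ++ [pvProd x]) (by rw [h, List.append_assoc]; rfl)
    simp only [List.length_append, List.length_cons, List.length_nil] at this ⊢
    rw [show ((pre.length : Int) + 1) = (((pre.length + 1 : Nat)) : Int) by push_cast; ring]
    rw [this]
    simp [List.append_assoc]
    omega


-- groups of five, last possibly short
def pvChunks (L : List Int) : List (List Int) :=
  if L = [] then [] else L.take 5 :: pvChunks (L.drop 5)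
termination_by L.length
decreasing_by
  rename_i h
  have : 0 < L.length := List.length_pos_iff.mpr h
  simp only [List.length_drop]; omega


theorem chunksEq (k : Nat) (L : List Int) (h : L.length = 5 * k) :
    (List.range k).map (fun j => (L.drop (5 * j)).take 5) = pvChunks L := by
  induction k generalizing L with
  | zero =>
    have : L = [] := List.eq_nil_of_length_eq_zero (by omega)
    simp [this, pvChunks]
  | succ n ih =>
    have hne : L ≠ [] := by intro e; subst e; simp only [List.length_nil] at h; omega
    rw [pvChunks, if_neg hne]
    rw [List.range_succ_eq_map]
    simp only [List.map_cons, List.map_map, Nat.mul_zero, List.drop_zero]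
    congr 1
    rw [← ih (L.drop 5) (by simp only [List.length_drop, h]; omega)]
    apply List.map_congr_left
    intro j _
    simp only [Function.comp]
    rw [List.drop_drop, Nat.succ_eq_add_one, show 5 * (j + 1) = 5 + 5 * j from by ring]


-- the common spec: mod-fold of the chunk products
def pvS (L : List Int) (r : Int) : Int :=
  ((pvChunks L).map pvProd).foldl (fun out x => PySem.Int.mod (out + x) pvPrime) r


theorem pvS_cons (L : List Int) (r : Int) (h : L ≠ []) :
    pvS L r = pvS (L.drop 5) (PySem.Int.mod (r + pvProd (L.take 5)) pvPrime) := by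
  rw [pvS, pvChunks, if_neg h]
  rfl


theorem bChunk (c5 rest : List Int) (r : Int) (h : c5.length = 5) :
    (c5 ++ rest).foldl pvBStep (r, 1, 0)
      = rest.foldl pvBStep (PySem.Int.mod (r + pvProd c5) pvPrime, 1, 0) := by
  rcases c5 with _|⟨a,_|⟨b,_|⟨c,_|⟨d,_|⟨e,r5⟩⟩⟩⟩⟩ <;> simp at h
  subst h
  rfl


theorem bMain (n : Nat) (L : List Int) (hn : L.length ≤ n) (r : Int) :
    (if (L.foldl pvBStep (r, 1, 0)).2.2 ≠ 0 then
       PySem.Int.mod ((L.foldl pvBStep (r, 1, 0)).1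
         + (L.foldl pvBStep (r, 1, 0)).2.1 * 32 ^ (5 - (L.foldl pvBStep (r, 1, 0)).2.2)) pvPrime
     else (L.foldl pvBStep (r, 1, 0)).1)
    = pvS (L ++ List.replicate ((5 - L.length % 5) % 5) 32) r := by
  induction n generalizing L r with
  | zero =>
    have hL : L = [] := List.eq_nil_of_length_eq_zero (by omega)
    subst hL
    simp [pvS, pvChunks]
  | succ m ih =>
    rcases L with _|⟨a,_|⟨b,_|⟨c,_|⟨d,_|⟨e,t⟩⟩⟩⟩⟩
    · simp [pvS, pvChunks]
    · simp only [List.foldl, pvBStep, List.length_cons, List.length_nil]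
      norm_num
      rw [pvS_cons _ _ (by simp)]
      simp [pvS, pvChunks, pvProd] <;> (congr 1 <;> ring)
    · simp only [List.foldl, pvBStep, List.length_cons, List.length_nil]
      norm_num
      rw [pvS_cons _ _ (by simp)]
      simp [pvS, pvChunks, pvProd] <;> (congr 1 <;> ring)
    · simp only [List.foldl, pvBStep, List.length_cons, List.length_nil]
      norm_num
      rw [pvS_cons _ _ (by simp)]
      simp [pvS, pvChunks, pvProd] <;> (congr 1 <;> ring)
    · simp only [List.foldl, pvBStep, List.length_cons, List.length_nil]
      norm_num
      rw [pvS_cons _ _ (by simp)]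
      simp [pvS, pvChunks, pvProd] <;> (congr 1 <;> ring)
    · have hsplit : a :: b :: c :: d :: e :: t = [a,b,c,d,e] ++ t := rfl
      rw [hsplit, bChunk [a,b,c,d,e] t r rfl]
      have ht : t.length ≤ m := by simp only [List.length_cons] at hn; omega
      rw [ih t ht (PySem.Int.mod (r + pvProd [a,b,c,d,e]) pvPrime)]
      rw [pvS_cons _ r (by simp)]
      have hpad : (5 - ([a,b,c,d,e] ++ t).length % 5) % 5 = (5 - t.length % 5) % 5 := by
        simp only [List.length_append, List.length_cons, List.length_nil]; omega
      rw [hpad]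
      congr 1


theorem pyRange05 (k : Nat) :
    PySem.List.pyRange 0 (((5 * k : Nat) : Int)) 5
      = (List.range k).map (fun j => (((5 * j : Nat)) : Int)) := by
  rw [PySem.List.pyRange_of_pos _ _ (by norm_num : (0:Int) < 5)]
  rcases Nat.eq_zero_or_pos k with h|h
  · subst h; simp
  · rw [if_pos (by exact_mod_cast Nat.mul_pos (by norm_num) h)]
    have hc : ((((5 * k : Nat) : Int) - 0 + 5 - 1) / 5).toNat = k := by omega
    rw [hc]
    apply List.map_congr_left
    intro j _
    push_cast
    ring


theorem hashSix_eq_pvS (L : List Int) : hashSix L = pvS (pvPadLoop L) 0 := by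
  have hP := pvPadLoop_eq L
  set P := pvPadLoop L with hPdef
  have hlen : P.length % 5 = 0 := by
    rw [hP]; simp only [List.length_append, List.length_replicate]; omega
  obtain ⟨k, hk⟩ : ∃ k, P.length = 5 * k := ⟨P.length / 5, by omega⟩
  have hcond : (PySem.Int.mod (P.length : Int) 5 == 0) = true := by
    rw [PySem.Int.mod_eq_emod_of_pos (by norm_num)]
    simp only [beq_iff_eq]
    omega
  rw [hashSix]
  simp only [← hPdef, hcond, if_true]
  -- identify subList with pvChunks P
  have hsub : (PySem.List.pyRange 0 (P.length : Int) 5).map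
        (fun n => PySem.List.slice P (some n) (some (n + 5))) = pvChunks P := by
    rw [hk]
    rw [show ((5 * k : Nat) : Int) = (((5 * k : Nat)) : Int) from rfl, pyRange05]
    rw [List.map_map]
    rw [← chunksEq k P hk]
    apply List.map_congr_left
    intro j _
    simp only [Function.comp]
    rw [PySem.List.slice_toNat P (by positivity) (by positivity)]
    congr 1 <;> omega
  rw [hsub]
  have hidx := idxFold (pvChunks P) [] (pvChunks P) [] rfl
  simp only [List.length_nil, Nat.cast_zero, List.nil_append, Nat.zero_add] at hidx
  rw [hidx]
  rfl

-- ===== VERDICT (by name: the statement is the Claim_ definition above) =====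
theorem hashSix_spec : Claim_equal_hashSix := by
  intro L _
  show hashSix L = hashSix_alt L
  rw [hashSix_eq_pvS, pvPadLoop_eq]
  have := bMain L.length L le_rfl 0
  simpa [hashSix_alt] using this.symm
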